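-- pv_equiv track=rewrite | github.com/PaulBC/misc_scripts | life_tiles.py | to_windows
-- ===== SOURCE A (Python) =====
-- def canonical_shift(window_str):
--   return min([window_str[i:] + window_str[:i] for i in range(len(window_str))])
--
-- def cell(live_cells, i, j):
--   return '1' if (i, j) in live_cells else '0'
--
-- def to_windows(live_cells):
--   windows = {}
--   for i, j in live_cells:
--     for di in range(-1, 1):
--       for dj in range(-1, 1):
--         wi, wj = i + di, j + dj
--         if (wi, wj) not in windows:
--           windows[(wi, wj)] = canonical_shift(''.join([cell(live_cells, ti, tj)
--            for (ti, tj) in [(wi, wj), (wi, wj + 1), (wi + 1, wj + 1), (wi + 1, wj)]]))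
--   return windows
-- ===== SOURCE B (Python) =====
-- # canonical 2x2 windows: scatter each live cell's bit into the 4 windows containing it,
-- # then map each window's 4-bit mask through a precomputed canonical-rotation table.
-- _CANON = ('0000', '0001', '0001', '0011', '0001', '0101', '0011', '0111',
--           '0001', '0011', '0101', '0111', '0011', '0111', '0111', '1111')
--
--
-- def to_windows(live_cells):
--     masks = {}
--     for i, j in live_cells:
--         for di, dj, w in ((-1, -1, 2), (-1, 0, 1), (0, -1, 4), (0, 0, 8)):
--             key = (i + di, j + dj)
--             masks[key] = masks.get(key, 0) | w
--     return {pos: _CANON[m] for pos, m in masks.items()}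
-- ===== Notes on version B (the rewrite author's own statement) =====
-- stated objective: alternative
-- what changed: B inverts the traversal: instead of A's gather (for every window, test membership of each of its 4 cells and take the min over the 4 string rotations), B scatters - each live cell ORs one bit into the 4-bit mask of each of the 4 windows containing it - and then maps every mask through a 16-entry precomputed table of canonical rotations, so no membership test and no runtime rotation/min remain.
import Mathlib
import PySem

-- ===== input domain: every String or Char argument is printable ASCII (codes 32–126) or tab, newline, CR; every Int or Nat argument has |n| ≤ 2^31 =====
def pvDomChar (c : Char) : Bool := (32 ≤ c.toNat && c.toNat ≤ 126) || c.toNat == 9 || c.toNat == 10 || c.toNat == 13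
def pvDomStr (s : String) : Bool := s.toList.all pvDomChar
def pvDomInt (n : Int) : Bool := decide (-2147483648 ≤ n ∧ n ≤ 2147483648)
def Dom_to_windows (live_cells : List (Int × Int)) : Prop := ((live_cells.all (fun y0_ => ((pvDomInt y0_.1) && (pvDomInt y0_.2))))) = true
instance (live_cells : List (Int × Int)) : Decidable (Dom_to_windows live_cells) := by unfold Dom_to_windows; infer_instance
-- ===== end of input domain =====

-- B replaces A's gather-and-canonicalize (membership test per window cell + min over string
-- rotations) by a scatter pass — each live cell ORs one bit into the masks of the 4 windows
-- containing it — followed by a 16-entry precomputed canonical table lookup (objective: alternative).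

-- ===== PORT A =====
-- min of the rotations window_str[i:] + window_str[:i]; computed on the code points
-- (PySem.Chars slices; Python's '<' on str is exactly '<' on .toList, so min is exact);
-- .getD [] is unreachable for the 4-char windows A builds (min([]) would raise).
def canonical_shift (window_str : String) : String :=
  String.ofList
    ((PySem.List.min?
        ((PySem.List.pyRange 0 (PySem.Str.len window_str) 1).map
          (fun i => PySem.Chars.slice window_str.toList (some i) none ++
                    PySem.Chars.slice window_str.toList none (some i)))
        (fun cs => cs)).getD [])

def cell (live_cells : List (Int × Int)) (i j : Int) : String :=
  if (i, j) ∈ live_cells then "1" else "0"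

def to_windows (live_cells : List (Int × Int)) : List (Int × Int × String) :=
  let windows : PySem.Dict (Int × Int) String :=
    live_cells.foldl (fun windows p =>
      (PySem.List.pyRange (-1) 1 1).foldl (fun windows di =>
        (PySem.List.pyRange (-1) 1 1).foldl (fun windows dj =>
          let wi := p.1 + di
          let wj := p.2 + dj
          if windows.contains (wi, wj) then windows
          else windows.insert (wi, wj)
            (canonical_shift (PySem.Str.join ""
              [cell live_cells wi wj, cell live_cells wi (wj + 1),
               cell live_cells (wi + 1) (wj + 1), cell live_cells (wi + 1) wj])))
          windows)
        windows)
      PySem.Dict.empty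
  -- the returned dict[(int,int), str] flattened to the required triple type, insertion order kept
  windows.items.map (fun kv => (kv.1.1, kv.1.2, kv.2))

-- ===== PORT B =====
-- _CANON: the canonical (lexicographically least rotation) form of each 4-bit window mask
def pvCanonTable : List String :=
  ["0000", "0001", "0001", "0011", "0001", "0101", "0011", "0111",
   "0001", "0011", "0101", "0111", "0011", "0111", "0111", "1111"]

def to_windows_alt (live_cells : List (Int × Int)) : List (Int × Int × String) :=
  let masks : PySem.Dict (Int × Int) Int :=
    live_cells.foldl (fun masks p =>
      (([((-1 : Int), (-1 : Int), (2 : Int)), (-1, 0, 1), (0, -1, 4), (0, 0, 8)] :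
          List (Int × Int × Int)).foldl (fun masks t =>
        let key := (p.1 + t.1, p.2 + t.2.1)
        masks.insert key (PySem.Int.bor (masks.getD key 0) t.2.2)) masks))
      PySem.Dict.empty
  -- _CANON[m]: every stored mask m is in 1..15, so pyGet?'s .getD "" default is unreachable
  masks.items.map (fun kv => (kv.1.1, kv.1.2, (PySem.List.pyGet? pvCanonTable kv.2).getD ""))

-- ===== PRECONDITION & SPEC =====
def Spec_to_windows (live_cells : List (Int × Int)) (out : List (Int × Int × String)) : Prop := out = to_windows_alt live_cells
instance (live_cells : List (Int × Int)) (out : List (Int × Int × String)) : Decidable (Spec_to_windows live_cells out) := by unfold Spec_to_windows; infer_instance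

-- ===== CLAIM (what is proved, stated in full; the proofs are below) =====
def Claim_equal_to_windows : Prop := ∀ (live_cells : List (Int × Int)), Dom_to_windows live_cells → Spec_to_windows live_cells (to_windows live_cells)

-- ===== LEMMAS AND PROOFS =====

-- the four window corners contributed by a live cell, in A's (and B's) generation order
def pvKeys4 (p : Int × Int) : List (Int × Int) :=
  [(p.1 - 1, p.2 - 1), (p.1 - 1, p.2), (p.1, p.2 - 1), (p.1, p.2)]

-- the (corner, bit-weight) pairs B scatters for a live cell, in B's generation order
def pvPairs4 (p : Int × Int) : List ((Int × Int) × Int) :=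
  [((p.1 - 1, p.2 - 1), 2), ((p.1 - 1, p.2), 1), ((p.1, p.2 - 1), 4), ((p.1, p.2), 8)]

-- the value A stores for window corner k (depends only on live_cells and k)
def pvF (live_cells : List (Int × Int)) (k : Int × Int) : String :=
  canonical_shift (PySem.Str.join ""
    [cell live_cells k.1 k.2, cell live_cells k.1 (k.2 + 1),
     cell live_cells (k.1 + 1) (k.2 + 1), cell live_cells (k.1 + 1) k.2])

-- a 4-bit mask from four bits, bracketed in pvE's gather order (weights 8,4,2,1)
def pvEB (b1 b2 b3 b4 : Bool) : Int :=
  PySem.Int.bor (PySem.Int.bor (PySem.Int.bor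
    (if b1 then 8 else 0) (if b2 then 4 else 0)) (if b3 then 2 else 0)) (if b4 then 1 else 0)

-- a 4-bit mask from four bits, bracketed in B's scatter order (weights 2,1,4,8)
def pvCB (c2 c1 c4 c8 : Bool) : Int :=
  PySem.Int.bor (PySem.Int.bor (PySem.Int.bor
    (if c2 then 2 else 0) (if c1 then 1 else 0)) (if c4 then 4 else 0)) (if c8 then 8 else 0)

-- the final 4-bit mask of window corner x, written by gathering the four memberships
def pvE (live_cells : List (Int × Int)) (x : Int × Int) : Int :=
  pvEB (decide ((x.1, x.2) ∈ live_cells)) (decide ((x.1, x.2 + 1) ∈ live_cells))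
    (decide ((x.1 + 1, x.2 + 1) ∈ live_cells)) (decide ((x.1 + 1, x.2) ∈ live_cells))

-- the bit a single live cell p contributes to window corner x
def pvC (x p : Int × Int) : Int :=
  pvCB (decide ((p.1 - 1, p.2 - 1) = x)) (decide ((p.1 - 1, p.2) = x))
    (decide ((p.1, p.2 - 1) = x)) (decide ((p.1, p.2) = x))

lemma pv_bor_nonneg {a b : Int} (ha : 0 ≤ a) (hb : 0 ≤ b) : 0 ≤ PySem.Int.bor a b := by
  rw [PySem.Int.bor_of_nonneg ha hb]; positivity

lemma pv_bor_assoc {a b c : Int} (ha : 0 ≤ a) (hb : 0 ≤ b) (hc : 0 ≤ c) :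
    PySem.Int.bor (PySem.Int.bor a b) c = PySem.Int.bor a (PySem.Int.bor b c) := by
  rw [PySem.Int.bor_of_nonneg ha hb, PySem.Int.bor_of_nonneg hb hc,
      PySem.Int.bor_of_nonneg (by positivity) hc, PySem.Int.bor_of_nonneg ha (by positivity)]
  simp [Nat.lor_assoc]

lemma pvC_nonneg (x p : Int × Int) : 0 ≤ pvC x p := by
  unfold pvC
  exact (by decide : ∀ c2 c1 c4 c8 : Bool, 0 ≤ pvCB c2 c1 c4 c8) _ _ _ _

lemma pvE_nonneg (lc : List (Int × Int)) (x : Int × Int) : 0 ≤ pvE lc x := by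
  unfold pvE
  exact (by decide : ∀ b1 b2 b3 b4 : Bool, 0 ≤ pvEB b1 b2 b3 b4) _ _ _ _

-- B's four scatter steps for one live cell, seen at a fixed key x, OR in exactly pvC x p
lemma pv_inner (x p : Int × Int) (m : Int) (hm : 0 ≤ m) :
    (pvPairs4 p).foldl (fun m kw => if kw.1 = x then PySem.Int.bor m kw.2 else m) m
      = PySem.Int.bor m (pvC x p) := by
  have hb : ∀ (b : Bool) (w : Int), 0 ≤ w → (0:Int) ≤ if b then w else 0 := by
    intro b w hw; cases b <;> simp [hw]
  have h2 := hb (decide ((p.1 - 1, p.2 - 1) = x)) 2 (by norm_num)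
  have h1 := hb (decide ((p.1 - 1, p.2) = x)) 1 (by norm_num)
  have h4 := hb (decide ((p.1, p.2 - 1) = x)) 4 (by norm_num)
  have h8 := hb (decide ((p.1, p.2) = x)) 8 (by norm_num)
  simp only [pvPairs4, List.foldl]
  have step : ∀ (P : Prop) [Decidable P] (m w : Int),
      (if P then PySem.Int.bor m w else m) = PySem.Int.bor m (if decide P then w else 0) := by
    intro P _ m w; by_cases h : P <;> simp [h, PySem.Int.bor_zero]
  simp only [step]
  rw [pv_bor_assoc (pv_bor_nonneg (pv_bor_nonneg hm h2) h1) h4 h8,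
      pv_bor_assoc (pv_bor_nonneg hm h2) h1 (pv_bor_nonneg h4 h8),
      pv_bor_assoc hm h2 (pv_bor_nonneg h1 (pv_bor_nonneg h4 h8)),
      ← pv_bor_assoc h1 h4 h8, ← pv_bor_assoc h2 (pv_bor_nonneg h1 h4) h8,
      ← pv_bor_assoc h2 h1 h4]
  rfl

-- the 256-case bit identity: ORing a scatter contribution into a gathered mask sets its bits
lemma pv_or_bits : ∀ c2 c1 c4 c8 b1 b2 b3 b4 : Bool,
    PySem.Int.bor (pvCB c2 c1 c4 c8) (pvEB b1 b2 b3 b4)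
      = pvEB (c8 || b1) (c4 || b2) (c2 || b3) (c1 || b4) := by decide

-- ORing one cell's contribution into the mask of the remaining cells gives the mask of all
lemma pv_cons_mask (x p : Int × Int) (lc : List (Int × Int)) :
    PySem.Int.bor (pvC x p) (pvE lc x) = pvE (p :: lc) x := by
  obtain ⟨p1, p2⟩ := p
  obtain ⟨x1, x2⟩ := x
  unfold pvC pvE
  rw [pv_or_bits]
  have comp : ∀ (P : Prop) [Decidable P] (q : Int × Int),
      (P ↔ q = (p1, p2)) →
      (decide P || decide (q ∈ lc)) = decide (q ∈ (p1, p2) :: lc) := by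
    intro P _ q hiff
    by_cases hP : P <;> by_cases hq : q ∈ lc <;>
      simp [List.mem_cons, ← hiff, hP, hq]
  congr 1 <;> [skip; skip; skip; skip] <;>
    apply comp <;> simp only [Prod.mk.injEq] <;> omega

-- the per-key OR-accumulation over all scattered pairs computes pvE
lemma pv_fold_M (x : Int × Int) :
    ∀ (lc : List (Int × Int)) (m : Int), 0 ≤ m →
      (lc.flatMap pvPairs4).foldl
          (fun m kw => if kw.1 = x then PySem.Int.bor m kw.2 else m) m
        = PySem.Int.bor m (pvE lc x) := by
  intro lc
  induction lc with
  | nil =>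
    intro m _
    simp only [List.flatMap_nil, List.foldl_nil]
    rw [show pvE [] x = 0 from by simp [pvE, pvEB], PySem.Int.bor_zero]
  | cons p lc ih =>
    intro m hm
    rw [List.flatMap_cons, List.foldl_append, pv_inner x p m hm,
        ih _ (pv_bor_nonneg hm (pvC_nonneg x p)),
        pv_bor_assoc hm (pvC_nonneg x p) (pvE_nonneg lc x), pv_cons_mask]

-- B's nested loop flattened to one pass over the scattered (key, weight) pairs
lemma pv_flatten_B (lc : List (Int × Int)) (d : PySem.Dict (Int × Int) Int) :
    lc.foldl (fun masks p =>
      (([((-1 : Int), (-1 : Int), (2 : Int)), (-1, 0, 1), (0, -1, 4), (0, 0, 8)] :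
          List (Int × Int × Int)).foldl (fun masks t =>
        let key := (p.1 + t.1, p.2 + t.2.1)
        masks.insert key (PySem.Int.bor (masks.getD key 0) t.2.2)) masks)) d
      = (lc.flatMap pvPairs4).foldl
          (fun d kw => d.insert kw.1 (PySem.Int.bor (d.getD kw.1 0) kw.2)) d := by
  rw [List.foldl_flatMap]
  congr 1
  funext d p
  simp [List.foldl, pvPairs4, sub_eq_add_neg]

-- the value stored at x after B's scatter fold, as a per-key accumulation
lemma pv_getD_fold_B :
    ∀ (ps : List ((Int × Int) × Int)) (d : PySem.Dict (Int × Int) Int) (x : Int × Int),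
      (ps.foldl (fun d kw => d.insert kw.1 (PySem.Int.bor (d.getD kw.1 0) kw.2)) d).getD x 0
        = ps.foldl (fun m kw => if kw.1 = x then PySem.Int.bor m kw.2 else m) (d.getD x 0) := by
  intro ps
  induction ps with
  | nil => intro d x; rfl
  | cons kw ps ih =>
    intro d x
    simp only [List.foldl]
    rw [ih]
    congr 1
    rw [PySem.Dict.getD_eq_get?_getD, PySem.Dict.get?_insert]
    by_cases h : x = kw.1
    · rw [if_pos h, if_pos h.symm, h]; rfl
    · rw [if_neg h, if_neg (fun hk => h hk.symm), ← PySem.Dict.getD_eq_get?_getD]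

-- A-side machinery (unchanged characterization of A's dict as a map over its key set)
lemma pv_flatten (lc : List (Int × Int)) (d : PySem.Dict (Int × Int) String) :
    lc.foldl (fun windows p =>
      (PySem.List.pyRange (-1) 1 1).foldl (fun windows di =>
        (PySem.List.pyRange (-1) 1 1).foldl (fun windows dj =>
          let wi := p.1 + di
          let wj := p.2 + dj
          if windows.contains (wi, wj) then windows
          else windows.insert (wi, wj) (pvF lc (wi, wj))) windows) windows) d
    = (lc.flatMap pvKeys4).foldl
        (fun d k => if d.contains k then d else d.insert k (pvF lc k)) d := by
  rw [List.foldl_flatMap]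
  have h4 : PySem.List.pyRange (-1) 1 1 = [-1, 0] := by decide
  have hfun : (fun (windows : PySem.Dict (Int × Int) String) (p : Int × Int) =>
      (PySem.List.pyRange (-1) 1 1).foldl (fun windows di =>
        (PySem.List.pyRange (-1) 1 1).foldl (fun windows dj =>
          let wi := p.1 + di
          let wj := p.2 + dj
          if windows.contains (wi, wj) then windows
          else windows.insert (wi, wj) (pvF lc (wi, wj))) windows) windows)
      = (fun d p => (pvKeys4 p).foldl
          (fun d k => if d.contains k then d else d.insert k (pvF lc k)) d) := by
    funext d p
    rw [h4]
    simp [List.foldl, pvKeys4, sub_eq_add_neg]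
  rw [hfun]

-- insert-if-absent = plain insert when every stored value is pvF of its key
lemma pv_cond_eq_uncond (f : Int × Int → String) :
    ∀ (ks : List (Int × Int)) (d : PySem.Dict (Int × Int) String),
      (∀ p ∈ d.items, p.2 = f p.1) →
      ks.foldl (fun d k => if d.contains k then d else d.insert k (f k)) d
        = ks.foldl (fun d k => d.insert k (f k)) d := by
  intro ks
  induction ks with
  | nil => intro d _; rfl
  | cons k ks ih =>
    intro d hinv
    simp only [List.foldl]
    by_cases h : d.contains k = true
    · rw [if_pos h]
      have hd : d.insert k (f k) = d := by
        apply PySem.Dict.ext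
        rw [PySem.Dict.items_insert_of_contains _ _ h]
        conv_rhs => rw [← List.map_id d.items]
        apply List.map_congr_left
        intro p hp
        by_cases hpk : p.1 = k
        · have hv := hinv p hp
          simp only [hpk, BEq.rfl, if_pos]
          rw [← hpk, ← hv]
          simp
        · simp [hpk]
      rw [hd]
      exact ih d hinv
    · rw [if_neg h]
      apply ih
      intro p hp
      rcases (PySem.Dict.mem_items_insert _ _ _ _).1 hp with h1 | h1
      · rw [h1]
      · exact hinv p h1.1

lemma pv_get?_fold (f : Int × Int → String) :
    ∀ (ks : List (Int × Int)) (d : PySem.Dict (Int × Int) String) (x : Int × Int),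
      (ks.foldl (fun d k => d.insert k (f k)) d).get? x
        = if x ∈ ks then some (f x) else d.get? x := by
  intro ks
  induction ks with
  | nil => intro d x; simp
  | cons k ks ih =>
    intro d x
    simp only [List.foldl, ih, List.mem_cons]
    by_cases hx : x ∈ ks
    · rw [if_pos hx, if_pos (Or.inr hx)]
    · rw [if_neg hx, PySem.Dict.get?_insert]
      by_cases hk : x = k
      · rw [if_pos hk, if_pos (Or.inl hk), hk]
      · rw [if_neg hk, if_neg (by tauto)]

lemma pv_items_fold (f : Int × Int → String) (ks : List (Int × Int)) :
    (ks.foldl (fun d k => d.insert k (f k)) PySem.Dict.empty).items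
      = (PySem.Set.ofList ks).map (fun k => (k, f k)) := by
  have hnd : (ks.foldl (fun d k => d.insert k (f k)) PySem.Dict.empty).keys.Nodup :=
    PySem.Dict.nodup_keys_foldl_insert ks (fun _ k => f k) PySem.Dict.empty
      PySem.Dict.nodup_keys_empty
  have hkeys : (ks.foldl (fun d k => d.insert k (f k)) PySem.Dict.empty).keys
      = PySem.Set.ofList ks := by
    rw [PySem.Dict.keys_foldl_insert]
    simp [PySem.Dict.keys_empty, PySem.Set.update_nil_left]
  rw [PySem.Dict.items_eq_map_keys _ hnd "", hkeys]
  apply List.map_congr_left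
  intro k hk
  have hmem : k ∈ ks := (PySem.Set.mem_ofList _ _).1 hk
  rw [PySem.Dict.getD_eq_get?_getD, pv_get?_fold, if_pos hmem]
  rfl

-- B's scattered keys, in order, are exactly A's generated corner keys
lemma pv_keys_eq (lc : List (Int × Int)) :
    (lc.flatMap pvPairs4).map (fun kw => kw.1) = lc.flatMap pvKeys4 := by
  induction lc with
  | nil => rfl
  | cons p lc ih => simp [pvPairs4, pvKeys4, ih]

-- B's mask dict, characterized as a map over the deduplicated corner keys
lemma pv_items_fold_B (lc : List (Int × Int)) :
    ((lc.flatMap pvPairs4).foldl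
        (fun d kw => d.insert kw.1 (PySem.Int.bor (d.getD kw.1 0) kw.2))
        PySem.Dict.empty).items
      = (PySem.Set.ofList (lc.flatMap pvKeys4)).map (fun k => (k, pvE lc k)) := by
  have hnd := PySem.Dict.nodup_keys_foldl_insert_key (lc.flatMap pvPairs4)
    (fun kw => kw.1) (fun d kw => PySem.Int.bor (d.getD kw.1 0) kw.2)
    PySem.Dict.empty PySem.Dict.nodup_keys_empty
  have hkeys : ((lc.flatMap pvPairs4).foldl
      (fun d kw => d.insert kw.1 (PySem.Int.bor (d.getD kw.1 0) kw.2))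
      PySem.Dict.empty).keys = PySem.Set.ofList (lc.flatMap pvKeys4) := by
    rw [PySem.Dict.keys_foldl_insert_key, pv_keys_eq]
    simp [PySem.Dict.keys_empty, PySem.Set.update_nil_left]
  rw [PySem.Dict.items_eq_map_keys _ hnd 0, hkeys]
  apply List.map_congr_left
  intro k _
  rw [pv_getD_fold_B]
  have h0 : (PySem.Dict.empty : PySem.Dict (Int × Int) Int).getD k 0 = 0 := by
    simp [PySem.Dict.getD_empty]
  rw [h0, pv_fold_M k lc 0 le_rfl, PySem.Int.bor_comm, PySem.Int.bor_zero]

-- per-corner agreement: A's min-of-rotations equals B's table lookup at the gathered mask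
lemma pv_canon_point (lc : List (Int × Int)) (k : Int × Int) :
    pvF lc k = (PySem.List.pyGet? pvCanonTable (pvE lc k)).getD "" := by
  by_cases m1 : (k.1, k.2) ∈ lc <;> by_cases m2 : (k.1, k.2 + 1) ∈ lc <;>
    by_cases m3 : (k.1 + 1, k.2 + 1) ∈ lc <;> by_cases m4 : (k.1 + 1, k.2) ∈ lc <;>
    simp only [pvF, pvE, cell, m1, m2, m3, m4, if_true, if_false, if_pos, if_neg,
      not_false_iff] <;> decide

-- ===== VERDICT (by name: the statement is the Claim_ definition above) =====
theorem to_windows_spec : Claim_equal_to_windows := by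
  intro lc _
  show to_windows lc = to_windows_alt lc
  have hA : to_windows lc = ((lc.flatMap pvKeys4).foldl
      (fun d k => if d.contains k then d else d.insert k (pvF lc k))
      PySem.Dict.empty).items.map (fun kv : (Int × Int) × String => (kv.1.1, kv.1.2, kv.2)) :=
    congrArg (fun d : PySem.Dict (Int × Int) String =>
      d.items.map (fun kv : (Int × Int) × String => (kv.1.1, kv.1.2, kv.2)))
      (pv_flatten lc PySem.Dict.empty)
  have hempty : ∀ p ∈ (PySem.Dict.empty : PySem.Dict (Int × Int) String).items,
      p.2 = pvF lc p.1 := by intro p hp; simp [PySem.Dict.empty] at hp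
  have hB : to_windows_alt lc = ((lc.flatMap pvPairs4).foldl
      (fun d kw => d.insert kw.1 (PySem.Int.bor (d.getD kw.1 0) kw.2))
      PySem.Dict.empty).items.map (fun kv : (Int × Int) × Int =>
        (kv.1.1, kv.1.2, (PySem.List.pyGet? pvCanonTable kv.2).getD "")) :=
    congrArg (fun d : PySem.Dict (Int × Int) Int =>
      d.items.map (fun kv : (Int × Int) × Int =>
        (kv.1.1, kv.1.2, (PySem.List.pyGet? pvCanonTable kv.2).getD "")))
      (pv_flatten_B lc PySem.Dict.empty)
  rw [hA, hB, pv_cond_eq_uncond (pvF lc) (lc.flatMap pvKeys4) PySem.Dict.empty hempty,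
      pv_items_fold, pv_items_fold_B, List.map_map, List.map_map]
  apply List.map_congr_left
  intro k _
  simp [Function.comp, pv_canon_point lc k]
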